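-- pv_equiv track=rewrite | github.com/Pedr0Rocha/15PuzzleAStar | astar.py | heuristicTwo
-- ===== SOURCE A (Python) =====
-- def heuristicTwo(board):
-- 	incorrectPieces = [];
-- 	row = 0; column = 0;
--
-- 	while (column < 3):
-- 		currentPiece = board[row][column];
-- 		if (currentPiece == 15 or currentPiece == 0):
-- 			pass;
-- 		elif ((currentPiece + 1) != board[row][column + 1]):
-- 			incorrectPieces.append(currentPiece);
-- 		column += 1;
--
-- 	while (row < 3):
-- 		currentPiece = board[row][column];
-- 		if (currentPiece == 15 or currentPiece == 0):
-- 			pass;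
-- 		elif ((currentPiece + 1) != board[row + 1][column]):
-- 			incorrectPieces.append(currentPiece);
-- 		row += 1;
--
-- 	while (column != 0):
-- 		currentPiece = board[row][column];
-- 		if (currentPiece == 15 or currentPiece == 0):
-- 			pass;
-- 		elif ((currentPiece + 1) != board[row][column - 1]):
-- 			incorrectPieces.append(currentPiece);
-- 		column -= 1;
--
-- 	while (row != 1):
-- 		currentPiece = board[row][column];
-- 		if (currentPiece == 15 or currentPiece == 0):
-- 			pass;
-- 		elif ((currentPiece + 1) != board[row - 1][column]):
-- 			incorrectPieces.append(currentPiece);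
-- 		row -= 1;
--
-- 	while (column != 2):
-- 		currentPiece = board[row][column];
-- 		if (currentPiece == 15 or currentPiece == 0):
-- 			pass;
-- 		elif ((currentPiece + 1) != board[row][column + 1]):
-- 			incorrectPieces.append(currentPiece);
-- 		column += 1;
--
-- 	currentPiece = board[row][column];
-- 	if (currentPiece == 15 or currentPiece == 0):
-- 		pass;
-- 	elif ((currentPiece + 1) != board[row + 1][column]):
-- 		incorrectPieces.append(currentPiece);
-- 	row += 1;
--
-- 	currentPiece = board[row][column];
-- 	if (currentPiece == 15 or currentPiece == 0):
-- 		pass;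
-- 	if ((currentPiece + 1) != board[row][column - 1]):
-- 		incorrectPieces.append(currentPiece);
-- 	column -= 1;
--
-- 	currentPiece = board[row][column];
-- 	if (currentPiece != 0 and currentPiece != 15):
-- 		incorrectPieces.append(currentPiece);
--
-- 	return len(incorrectPieces);
-- ===== SOURCE B (Python) =====
-- # Different algorithm for the spiral order: recursively PEEL the matrix (take the
-- # top row, rotate the rest counter-clockwise, repeat) to obtain the 16 values in
-- # visit order, then count adjacent mismatches pairwise over that value list.
-- # The last two cells keep A's straight-line handling: the check of the value at
-- # position 14 is unconditional (A uses 'if', not 'elif'), and the final value has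
-- # no successor and is counted iff it is neither 0 nor 15.
-- def spiral(m):
--     if not m:
--         return []
--     return list(m[0]) + spiral([list(r) for r in zip(*m[1:])][::-1])
--
-- def heuristicTwo(board):
--     s = spiral([row[:4] for row in board[:4]])
--     c = sum(1 for a, b in zip(s[:14], s[1:]) if a != 0 and a != 15 and a + 1 != b)
--     if s[14] + 1 != s[15]:
--         c += 1
--     if s[15] != 0 and s[15] != 15:
--         c += 1
--     return c
-- ===== Notes on version B (the rewrite author's own statement) =====
-- stated objective: alternative
-- what changed: Replaces A's six unrolled coordinate while-loops with a recursive matrix-peeling spiral (take top row, rotate the rest counter-clockwise, recurse) that yields the 16 values in visit order, then counts mismatches with one pairwise zip over that value list; the two trailing cells keep A's straight-line handling.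
import Mathlib
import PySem

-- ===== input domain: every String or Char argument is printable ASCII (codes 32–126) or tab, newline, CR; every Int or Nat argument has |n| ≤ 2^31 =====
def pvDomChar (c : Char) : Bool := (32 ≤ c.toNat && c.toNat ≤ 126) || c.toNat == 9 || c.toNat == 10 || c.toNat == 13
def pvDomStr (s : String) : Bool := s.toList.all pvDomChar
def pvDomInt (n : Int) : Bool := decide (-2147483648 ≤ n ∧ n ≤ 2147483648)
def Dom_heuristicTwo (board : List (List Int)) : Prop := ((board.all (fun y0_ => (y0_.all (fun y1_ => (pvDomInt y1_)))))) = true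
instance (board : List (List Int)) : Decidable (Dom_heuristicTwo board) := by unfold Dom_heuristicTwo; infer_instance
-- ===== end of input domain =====

-- B replaces A's six unrolled coordinate while-loops with a recursive matrix-peeling
-- spiral followed by one pairwise count over the value list (objective: alternative).

-- board[r][c] for literal nonnegative indices; exact under Pre_heuristicTwo (indices in range)
def pvCell (board : List (List Int)) (r c : Nat) : Int :=
  (board.getD r []).getD c 0

-- ===== PORT A =====
-- the repeated loop body of A: skip 0/15, else append when the successor cell mismatches
def pvStepA (board : List (List Int)) (acc : List Int) (p q : Nat × Nat) : List Int :=
  let cur := pvCell board p.1 p.2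
  if cur = 15 ∨ cur = 0 then acc
  else if cur + 1 ≠ pvCell board q.1 q.2 then acc ++ [cur] else acc

def heuristicTwo (board : List (List Int)) : Int :=
  -- while column < 3 (row = 0)
  let a1 := List.foldl (fun acc c => pvStepA board acc (0, c) (0, c + 1)) [] [0, 1, 2]
  -- while row < 3 (column = 3)
  let a2 := List.foldl (fun acc r => pvStepA board acc (r, 3) (r + 1, 3)) a1 [0, 1, 2]
  -- while column ≠ 0 (row = 3)
  let a3 := List.foldl (fun acc c => pvStepA board acc (3, c) (3, c - 1)) a2 [3, 2, 1]
  -- while row ≠ 1 (column = 0)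
  let a4 := List.foldl (fun acc r => pvStepA board acc (r, 0) (r - 1, 0)) a3 [3, 2]
  -- while column ≠ 2 (row = 1)
  let a5 := List.foldl (fun acc c => pvStepA board acc (1, c) (1, c + 1)) a4 [0, 1]
  -- trailing cell (1,2) compared to (2,2)
  let a6 := pvStepA board a5 (1, 2) (2, 2)
  -- cell (2,2): second check is a plain 'if', not 'elif' → unconditional comparison
  let c22 := pvCell board 2 2
  let a7 := if c22 + 1 ≠ pvCell board 2 1 then a6 ++ [c22] else a6
  -- cell (2,1): counted iff neither 0 nor 15
  let c21 := pvCell board 2 1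
  let a8 := if c21 ≠ 0 ∧ c21 ≠ 15 then a7 ++ [c21] else a7
  (a8.length : Int)

-- ===== PORT B =====
-- Python's zip(*m): heads of all rows while every row is nonempty (truncating);
-- fuel bounds the recursion (row lengths ≤ 4 for the trimmed board, fuel 4 is exact there)
def pvZipStar (fuel : Nat) (m : List (List Int)) : List (List Int) :=
  match fuel with
  | 0 => []
  | fuel + 1 =>
    if m.isEmpty then []
    else if m.all (fun r => ¬ r.isEmpty) then
      (m.map (fun r => r.headD 0)) :: pvZipStar fuel (m.map (fun r => r.tail))
    else []

-- spiral(m) = m[0] ++ spiral(rotate-ccw m[1:]); fuel bounds the recursion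
-- (depth ≤ rows + cols ≤ 8 for the ≤4×≤4 trimmed board, so fuel 16 is exact there)
def pvSpiral (fuel : Nat) (m : List (List Int)) : List Int :=
  match fuel with
  | 0 => []
  | fuel + 1 =>
    match m with
    | [] => []
    | r :: rest => r ++ pvSpiral fuel ((pvZipStar 4 rest).reverse)

def heuristicTwo_alt (board : List (List Int)) : Int :=
  let s := pvSpiral 16 ((board.take 4).map (fun r => r.take 4))
  -- s[14]/s[15]: in range under Pre_heuristicTwo (s has 16 entries), so getD is exact there
  let c := ((s.take 14).zip (s.drop 1)).foldl
    (fun n p => if p.1 ≠ 0 ∧ p.1 ≠ 15 ∧ p.1 + 1 ≠ p.2 then n + 1 else n) (0 : Int)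
  let c2 := if s.getD 14 0 + 1 ≠ s.getD 15 0 then c + 1 else c
  if s.getD 15 0 ≠ 0 ∧ s.getD 15 0 ≠ 15 then c2 + 1 else c2

-- ===== PRECONDITION & SPEC =====
-- Pre_ excludes exactly the boards on which Python A raises IndexError:
-- A indexes rows 0..3 and columns 0..3, so the first 4 rows must exist and have length ≥ 4.
def Pre_heuristicTwo (board : List (List Int)) : Prop :=
  4 ≤ board.length ∧ ∀ row ∈ board.take 4, 4 ≤ row.length
instance (board : List (List Int)) : Decidable (Pre_heuristicTwo board) := by
  unfold Pre_heuristicTwo; infer_instance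
def pvWitness_heuristicTwo : List (List Int) :=
  [[1, 2, 3, 4], [12, 13, 14, 5], [11, 0, 15, 6], [10, 9, 8, 7]]

def Spec_heuristicTwo (board : List (List Int)) (out : Int) : Prop := out = heuristicTwo_alt board
instance (board : List (List Int)) (out : Int) : Decidable (Spec_heuristicTwo board out) := by unfold Spec_heuristicTwo; infer_instance

-- ===== CLAIM (what is proved, stated in full; the proofs are below) =====
def Claim_equal_heuristicTwo : Prop := ∀ (board : List (List Int)), Dom_heuristicTwo board → Pre_heuristicTwo board → Spec_heuristicTwo board (heuristicTwo board)

-- ===== LEMMAS AND PROOFS =====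

-- length (as Int) of one A-step = additive contribution in canonical shape
theorem pvStepA_len (board : List (List Int)) (acc : List Int) (p q : Nat × Nat) :
    ((pvStepA board acc p q).length : Int) =
      (acc.length : Int) +
        (if pvCell board p.1 p.2 ≠ 0 ∧ pvCell board p.1 p.2 ≠ 15 then
          (if pvCell board p.1 p.2 + 1 ≠ pvCell board q.1 q.2 then 1 else 0) else 0) := by
  unfold pvStepA
  by_cases h15 : pvCell board p.1 p.2 = 15
  · simp [h15]
  · by_cases h0 : pvCell board p.1 p.2 = 0
    · simp [h0]
    · simp only [h15, h0, or_false, if_neg, if_pos, and_true, not_false_iff, ne_eq]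
      split_ifs <;> simp

-- termwise: A's nested-if contribution equals B's conjunction contribution
theorem pvTerm (a b : Int) :
    (if ¬a = 0 ∧ ¬a = 15 then if a + 1 = b then (0 : Int) else 1 else 0) =
      (if ¬a = 0 ∧ ¬a = 15 ∧ ¬a + 1 = b then 1 else 0) := by
  split_ifs <;> tauto

-- an if that either adds m or leaves n, as n + contribution
theorem pvIfAdd (p : Prop) [Decidable p] (n m : Int) :
    (if p then n + m else n) = n + (if p then m else 0) := by
  split_ifs <;> simp

theorem pvIfAppLen (p : Prop) [Decidable p] (acc : List Int) (x : Int) :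
    (((if p then acc ++ [x] else acc).length : Nat) : Int) =
      (acc.length : Int) + (if p then 1 else 0) := by
  split_ifs <;> simp

-- ===== VERDICT (by name: the statement is the Claim_ definition above) =====
theorem heuristicTwo_spec : Claim_equal_heuristicTwo := by
  intro board _ hpre
  obtain ⟨hlen, hrows⟩ := hpre
  rcases board with _ | ⟨r0, board⟩; · simp only [List.length_nil] at hlen; omega
  rcases board with _ | ⟨r1, board⟩; · simp only [List.length_cons, List.length_nil] at hlen; omega
  rcases board with _ | ⟨r2, board⟩; · simp only [List.length_cons, List.length_nil] at hlen; omega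
  rcases board with _ | ⟨r3, board⟩; · simp only [List.length_cons, List.length_nil] at hlen; omega
  have h0 : 4 ≤ r0.length := hrows r0 (by simp [List.take])
  have h1 : 4 ≤ r1.length := hrows r1 (by simp [List.take])
  have h2 : 4 ≤ r2.length := hrows r2 (by simp [List.take])
  have h3 : 4 ≤ r3.length := hrows r3 (by simp [List.take])
  clear hrows hlen
  obtain ⟨a00, a01, a02, a03, t0, rfl⟩ : ∃ a b c d t, r0 = a :: b :: c :: d :: t := by
    rcases r0 with _ | ⟨a, _ | ⟨b, _ | ⟨c, _ | ⟨d, t⟩⟩⟩⟩ <;>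
      first
      | exact ⟨_, _, _, _, _, rfl⟩
      | (simp only [List.length_nil, List.length_cons] at h0; omega)
  obtain ⟨a10, a11, a12, a13, t1, rfl⟩ : ∃ a b c d t, r1 = a :: b :: c :: d :: t := by
    rcases r1 with _ | ⟨a, _ | ⟨b, _ | ⟨c, _ | ⟨d, t⟩⟩⟩⟩ <;>
      first
      | exact ⟨_, _, _, _, _, rfl⟩
      | (simp only [List.length_nil, List.length_cons] at h1; omega)
  obtain ⟨a20, a21, a22, a23, t2, rfl⟩ : ∃ a b c d t, r2 = a :: b :: c :: d :: t := by
    rcases r2 with _ | ⟨a, _ | ⟨b, _ | ⟨c, _ | ⟨d, t⟩⟩⟩⟩ <;>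
      first
      | exact ⟨_, _, _, _, _, rfl⟩
      | (simp only [List.length_nil, List.length_cons] at h2; omega)
  obtain ⟨a30, a31, a32, a33, t3, rfl⟩ : ∃ a b c d t, r3 = a :: b :: c :: d :: t := by
    rcases r3 with _ | ⟨a, _ | ⟨b, _ | ⟨c, _ | ⟨d, t⟩⟩⟩⟩ <;>
      first
      | exact ⟨_, _, _, _, _, rfl⟩
      | (simp only [List.length_nil, List.length_cons] at h3; omega)
  unfold Spec_heuristicTwo heuristicTwo heuristicTwo_alt
  simp only [pvSpiral, pvZipStar, List.take, List.map, List.isEmpty, List.all,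
    List.headD, List.tail, List.reverse, List.reverse_cons,
    List.nil_append, List.cons_append, List.append_nil, List.zip, List.zipWith,
    List.drop, List.foldl, pvStepA_len, pvIfAdd, pvIfAppLen,
    pvCell, List.getD, List.length_nil, Nat.cast_zero, Bool.and_self,
    decide_true, Bool.not_true, Bool.not_false]
  norm_num [pvCell, List.getD, pvTerm]
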